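-- pv_equiv track=rewrite | github.com/air55555/inventar | utils.py | extract_inv_strings
-- ===== SOURCE A (Python) =====
-- def extract_inv_strings(text):
--     """
--     Extract strings from the text that start with "013", "72", or "71" and consider leading zeroes.
--
--     """
--     extracted_strings = []
--
--     current_string = ""
--     started_string = False
--
--     for char in text:
--         if char.isdigit() or char.isalpha():
--             current_string += char
--             started_string = True
--         elif started_string:
--             if current_string.startswith(("013", "72", "71")):
--                 extracted_strings.append(current_string)
--             current_string = ""
--             started_string = False
--
--     # Check for the last string in the text
--     if started_string and current_string.startswith(("013", "72", "71")):
--         extracted_strings.append(current_string)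
--
--     return extracted_strings
-- ===== SOURCE B (Python) =====
-- from itertools import groupby
--
--
-- def extract_inv_strings(text):
--     """Group the text into maximal alnum runs with itertools.groupby, then keep
--     the runs that start with one of the inventory prefixes."""
--     tokens = (''.join(group)
--               for is_word, group in groupby(text, key=lambda c: c.isdigit() or c.isalpha())
--               if is_word)
--     return [tok for tok in tokens if tok.startswith(('013', '72', '71'))]
-- ===== Notes on version B (the rewrite author's own statement) =====
-- stated objective: idiomatic
-- what changed: Replaced the inline flag-based character scanner with itertools.groupby: the text is split into maximal alnum runs (key = c.isdigit() or c.isalpha()), each run is joined into a token, and tokens starting with ('013','72','71') are collected by a filter.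
import Mathlib
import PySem

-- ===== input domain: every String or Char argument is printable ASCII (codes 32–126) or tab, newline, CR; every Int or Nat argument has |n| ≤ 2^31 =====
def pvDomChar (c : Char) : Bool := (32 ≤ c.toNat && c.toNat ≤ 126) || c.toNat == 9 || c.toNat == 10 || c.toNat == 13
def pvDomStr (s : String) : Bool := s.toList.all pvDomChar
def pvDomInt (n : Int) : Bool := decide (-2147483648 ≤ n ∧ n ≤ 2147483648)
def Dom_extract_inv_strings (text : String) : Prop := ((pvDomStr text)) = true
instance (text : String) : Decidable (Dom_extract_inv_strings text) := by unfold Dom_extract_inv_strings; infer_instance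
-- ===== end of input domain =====

-- B replaces A's inline flag-based scanner by a groupby-style decomposition: split the
-- text into maximal alnum runs, then filter the runs by prefix (objective: idiomatic).

-- ===== PORT A =====
-- char.isdigit() or char.isalpha()
def pvTokA (c : Char) : Bool := PySem.Chars.isdigit c || PySem.Chars.isalpha c

-- current_string.startswith(("013", "72", "71"))
def pvPrefA (cs : List Char) : Bool :=
  PySem.Chars.startswith cs ['0','1','3'] || PySem.Chars.startswith cs ['7','2'] ||
    PySem.Chars.startswith cs ['7','1']

-- the body of A's for-loop, on state (extracted_strings, current_string, started_string)
def pvStepA (st : List (List Char) × List Char × Bool) (c : Char) :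
    List (List Char) × List Char × Bool :=
  match st with
  | (ex, cur, started) =>
    if pvTokA c then (ex, cur ++ [c], true)
    else if started then
      ((if pvPrefA cur then ex ++ [cur] else ex), ([] : List Char), false)
    else st

def extract_inv_strings (text : String) : List String :=
  match text.toList.foldl pvStepA ([], [], false) with
  | (ex, cur, started) =>
    if started && pvPrefA cur then (ex ++ [cur]).map String.ofList else ex.map String.ofList

-- ===== PORT B =====
def pvTokB (c : Char) : Bool := PySem.Chars.isdigit c || PySem.Chars.isalpha c

def pvPrefB (cs : List Char) : Bool :=
  PySem.Chars.startswith cs ['0','1','3'] || PySem.Chars.startswith cs ['7','2'] ||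
    PySem.Chars.startswith cs ['7','1']

-- groupby(text, key = pvTokB), keeping only the key=True groups (maximal alnum runs)
def pvRuns : List Char → List (List Char)
  | [] => []
  | c :: cs =>
    if pvTokB c then (c :: cs.takeWhile pvTokB) :: pvRuns (cs.dropWhile pvTokB)
    else pvRuns cs
termination_by cs => cs.length
decreasing_by
  · have := List.length_dropWhile_le pvTokB cs
    simp; omega
  · simp

def extract_inv_strings_alt (text : String) : List String :=
  ((pvRuns text.toList).filter pvPrefB).map String.ofList

-- ===== PRECONDITION & SPEC =====
def Spec_extract_inv_strings (text : String) (out : List String) : Prop := out = extract_inv_strings_alt text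
instance (text : String) (out : List String) : Decidable (Spec_extract_inv_strings text out) := by unfold Spec_extract_inv_strings; infer_instance

-- ===== CLAIM (what is proved, stated in full; the proofs are below) =====
def Claim_equal_extract_inv_strings : Prop := ∀ (text : String), Dom_extract_inv_strings text → Spec_extract_inv_strings text (extract_inv_strings text)

-- ===== LEMMAS AND PROOFS =====

-- A's trailing check, as a function of the loop state
def pvFin (st : List (List Char) × List Char × Bool) : List (List Char) :=
  if st.2.2 && pvPrefA st.2.1 then st.1 ++ [st.2.1] else st.1

-- Invariant for A's loop: running it from an idle state (started = false) yields the
-- prefix-filtered runs; running it mid-run (started = true, partial token cur) yields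
-- the (possibly collected) completed token followed by the filtered remaining runs.
theorem pv_combined (n : Nat) : ∀ cs : List Char, cs.length ≤ n →
    (∀ ex, pvFin (cs.foldl pvStepA (ex, [], false)) = ex ++ (pvRuns cs).filter pvPrefB) ∧
    (∀ cur ex, pvFin (cs.foldl pvStepA (ex, cur, true)) =
      (if pvPrefA (cur ++ cs.takeWhile pvTokB) then ex ++ [cur ++ cs.takeWhile pvTokB] else ex)
        ++ (pvRuns (cs.dropWhile pvTokB)).filter pvPrefB) := by
  induction n with
  | zero =>
    intro cs hcs
    have : cs = [] := List.eq_nil_of_length_eq_zero (Nat.le_zero.mp hcs)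
    subst this
    constructor
    · intro ex; simp [pvFin, pvRuns]
    · intro cur ex; simp [pvFin, pvRuns]
  | succ n ih =>
    intro cs hcs
    cases cs with
    | nil =>
      constructor
      · intro ex; simp [pvFin, pvRuns]
      · intro cur ex; simp [pvFin, pvRuns]
    | cons c cs =>
      have hlen : cs.length ≤ n := by simpa using hcs
      constructor
      · intro ex
        by_cases hc : pvTokB c
        · have h2 := (ih cs hlen).2 [c] ex
          simp only [List.foldl_cons, pvStepA]
          rw [show pvTokA c = true from hc]
          simp only [if_true, List.nil_append]
          rw [h2]
          rw [show pvPrefA ([c] ++ cs.takeWhile pvTokB) = pvPrefB (c :: cs.takeWhile pvTokB) from rfl]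
          simp only [pvRuns, hc, if_true, List.filter_cons]
          split_ifs with h <;> simp
        · have h1 := (ih cs hlen).1 ex
          simp only [List.foldl_cons, pvStepA]
          rw [show pvTokA c = false from by simpa [pvTokA, pvTokB] using hc]
          simp only [Bool.false_eq_true, if_false]
          rw [h1]
          simp [pvRuns, hc]
      · intro cur ex
        by_cases hc : pvTokB c
        · have h2 := (ih cs hlen).2 (cur ++ [c]) ex
          simp only [List.foldl_cons, pvStepA]
          rw [show pvTokA c = true from hc]
          simp only [if_true]
          rw [h2]
          simp [hc]
        · have h1 := (ih cs hlen).1 (if pvPrefA cur then ex ++ [cur] else ex)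
          simp only [List.foldl_cons, pvStepA]
          rw [show pvTokA c = false from by simpa [pvTokA, pvTokB] using hc]
          simp only [Bool.false_eq_true, if_false, if_true]
          rw [h1]
          simp [pvRuns, hc]

-- ===== VERDICT (by name: the statement is the Claim_ definition above) =====
theorem extract_inv_strings_spec : Claim_equal_extract_inv_strings := by
  intro text _
  unfold Spec_extract_inv_strings extract_inv_strings extract_inv_strings_alt
  have h := (pv_combined text.toList.length text.toList le_rfl).1 []
  cases hst : text.toList.foldl pvStepA ([], [], false) with
  | mk ex rest =>
    cases rest with
    | mk cur s =>
      rw [hst] at h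
      simp only [pvFin, List.nil_append] at h
      simp only []
      rw [← apply_ite (List.map String.ofList)]
      rw [show (if s && pvPrefA cur then ex ++ [cur] else ex) = (pvRuns text.toList).filter pvPrefB from h]
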